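-- pv_equiv track=rewrite | github.com/TragicMayhem/advent_of_code | aoc_2024/snippets.py | create_point_dictionary
-- ===== SOURCE A (Python) =====
-- def create_point_dictionary(grid):
--     """
--     Creates a dictionary of lists of points from a grid of characters.
--
--     Args:
--       grid: A list of strings representing the grid.
--
--     Returns:
--       A dictionary where keys are characters and values are
--       lists of (x, y) tuples representing the points.
--     """
--
--     point_dict = {}
--     for y, row in enumerate(grid):
--         for x, char in enumerate(row):
--             if char != ".":
--                 if char not in point_dict:
--                     point_dict[char] = []
--                 point_dict[char].append((x, y))
--
--     return point_dict
-- ===== SOURCE B (Python) =====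
-- def create_point_dictionary(grid):
--     """Flatten the grid into (char, x, y) cells once, then build each
--     dictionary entry by filtering that flat list per distinct character."""
--     cells = [(ch, x, y) for y, row in enumerate(grid)
--              for x, ch in enumerate(row) if ch != "."]
--     keys = list(dict.fromkeys(ch for ch, _, _ in cells))
--     return {k: [(x, y) for ch, x, y in cells if ch == k] for k in keys}
-- ===== Notes on version B (the rewrite author's own statement) =====
-- stated objective: alternative
-- what changed: Replaces the incremental dict-of-lists built inside nested loops by flattening the grid once into (char,x,y) cells, deduplicating the characters in first-occurrence order, and building each entry by filtering the flat cell list per character.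
import Mathlib
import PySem

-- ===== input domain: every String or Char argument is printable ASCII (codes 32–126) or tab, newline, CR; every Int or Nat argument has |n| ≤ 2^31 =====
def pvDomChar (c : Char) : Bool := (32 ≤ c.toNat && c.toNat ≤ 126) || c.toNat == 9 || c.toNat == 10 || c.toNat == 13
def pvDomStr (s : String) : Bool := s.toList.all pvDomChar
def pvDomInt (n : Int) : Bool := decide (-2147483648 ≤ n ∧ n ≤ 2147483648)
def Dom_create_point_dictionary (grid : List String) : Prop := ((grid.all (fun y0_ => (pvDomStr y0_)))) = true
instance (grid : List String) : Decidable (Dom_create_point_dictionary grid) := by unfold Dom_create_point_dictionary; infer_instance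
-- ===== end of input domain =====

-- B flattens the grid once into (char, x, y) cells and builds each dict entry by
-- filtering that flat list per distinct character (first-occurrence key order).

-- ===== PORT A =====
-- Literal port: nested enumerate loops building a dict; `point_dict[char].append(p)`
-- re-inserts the extended list at the existing key (position preserved).
def create_point_dictionary (grid : List String) : List (String × List (Int × Int)) :=
  let point_dict : PySem.Dict String (List (Int × Int)) :=
    (PySem.List.enumerate grid).foldl (fun d yr =>
      (PySem.List.enumerate yr.2.toList).foldl (fun d xc =>
        if xc.2 ≠ '.' then
          let key := String.singleton xc.2
          let d1 := if d.contains key then d else d.insert key []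
          d1.insert key (d1.getD key [] ++ [(xc.1, yr.1)])
        else d) d) PySem.Dict.empty
  point_dict.items

-- ===== PORT B =====
def create_point_dictionary_alt (grid : List String) : List (String × List (Int × Int)) :=
  let cells : List (String × Int × Int) :=
    (PySem.List.enumerate grid).flatMap (fun yr =>
      (((PySem.List.enumerate yr.2.toList).filter (fun xc => xc.2 ≠ '.')).map
        (fun xc => (String.singleton xc.2, xc.1, yr.1))))
  let keys := PySem.Set.ofList (cells.map (·.1))
  keys.map (fun k => (k, (cells.filter (fun c => c.1 == k)).map (·.2)))

-- ===== PRECONDITION & SPEC =====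
def Spec_create_point_dictionary (grid : List String) (out : List (String × List (Int × Int))) : Prop := out = create_point_dictionary_alt grid
instance (grid : List String) (out : List (String × List (Int × Int))) : Decidable (Spec_create_point_dictionary grid out) := by unfold Spec_create_point_dictionary; infer_instance

-- ===== CLAIM (what is proved, stated in full; the proofs are below) =====
def Claim_equal_create_point_dictionary : Prop := ∀ (grid : List String), Dom_create_point_dictionary grid → Spec_create_point_dictionary grid (create_point_dictionary grid)

-- ===== LEMMAS AND PROOFS =====

-- A's per-cell step ("ensure key, then append") is the dict `modify` with default [].
theorem pvStep_eq_modify (d : PySem.Dict String (List (Int × Int))) (k : String) (v : Int × Int) :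
    (let d1 := if d.contains k then d else d.insert k []
     d1.insert k (d1.getD k [] ++ [v])) = d.modify k [] (· ++ [v]) := by
  by_cases h : d.contains k = true
  · simp [h, PySem.Dict.modify]
  · simp only [Bool.not_eq_true] at h
    simp [h, PySem.Dict.modify, PySem.Dict.getD_insert_self,
      PySem.Dict.insert_insert_self, PySem.Dict.getD_of_not_contains d _ h]

-- A's nested loops are one fold of that step over B's flat cell list.
theorem pvFold_eq_cells (grid : List String) :
    ((PySem.List.enumerate grid).foldl (fun d yr =>
      (PySem.List.enumerate yr.2.toList).foldl (fun d xc =>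
        if xc.2 ≠ '.' then
          let key := String.singleton xc.2
          let d1 := if d.contains key then d else d.insert key []
          d1.insert key (d1.getD key [] ++ [(xc.1, yr.1)])
        else d) d) (PySem.Dict.empty : PySem.Dict String (List (Int × Int)))) =
    ((PySem.List.enumerate grid).flatMap (fun yr =>
      (((PySem.List.enumerate yr.2.toList).filter (fun xc => xc.2 ≠ '.')).map
        (fun xc => (String.singleton xc.2, xc.1, yr.1))))).foldl
      (fun d c => d.modify c.1 [] (· ++ [c.2])) PySem.Dict.empty := by
  rw [List.foldl_flatMap]
  apply PySem.List.foldl_congr_mem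
  intro d yr _
  rw [List.foldl_map, List.foldl_filter]
  apply PySem.List.foldl_congr_mem
  intro d xc _
  by_cases h : xc.2 = '.'
  · simp [h]
  · simp only [h, ne_eq, not_false_iff, decide_true, if_true]
    rw [← pvStep_eq_modify]

theorem create_point_dictionary_spec : Claim_equal_create_point_dictionary := by
  intro grid _
  unfold Spec_create_point_dictionary create_point_dictionary create_point_dictionary_alt
  rw [pvFold_eq_cells]
  generalize (PySem.List.enumerate grid).flatMap (fun yr =>
      (((PySem.List.enumerate yr.2.toList).filter (fun xc => xc.2 ≠ '.')).map
        (fun xc => (String.singleton xc.2, xc.1, yr.1)))) = cells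
  have hnd : ((cells.foldl (fun d c => d.modify c.1 [] (· ++ [c.2]))
      (PySem.Dict.empty : PySem.Dict String (List (Int × Int)))).keys).Nodup := by
    exact PySem.Dict.nodup_keys_foldl_modify_key cells _ _ _ _ (by simp [PySem.Dict.keys_empty])
  rw [PySem.Dict.items_eq_map_keys _ hnd []]
  rw [PySem.Dict.keys_foldl_modify_key]
  simp only [PySem.Dict.keys_empty, PySem.Set.update_nil_left]
  apply List.map_congr_left
  intro k _
  rw [PySem.Dict.getD_foldl_modify_append]
  simp [PySem.Dict.getD_empty]
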